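-- pv_equiv track=rewrite | github.com/Viktoria223/Searcher | main3.py | determining_the_indexes_of_lemmas
-- ===== SOURCE A (Python) =====
-- def determining_the_indexes_of_lemmas(lemmas, i):
--     indexes = {}
--     for lemm in lemmas:
--         if lemm not in indexes:
--             indexes[lemm] = []
--             indexes[lemm].append(i)
--         else:
--             indexes[lemm].append(i)
--     return indexes
-- ===== SOURCE B (Python) =====
-- def determining_the_indexes_of_lemmas(lemmas, i):
--     counts = {}
--     for lemm in lemmas:
--         counts[lemm] = counts.get(lemm, 0) + 1
--     return {lemm: [i] * count for lemm, count in counts.items()}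
-- ===== Notes on version B (the rewrite author's own statement) =====
-- stated objective: simpler
-- what changed: Replaces the per-element membership-test-and-append accumulation with a two-phase count-then-materialize structure: one pass builds a frequency table, then a comprehension emits [i]*count per distinct lemma.
import Mathlib
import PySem

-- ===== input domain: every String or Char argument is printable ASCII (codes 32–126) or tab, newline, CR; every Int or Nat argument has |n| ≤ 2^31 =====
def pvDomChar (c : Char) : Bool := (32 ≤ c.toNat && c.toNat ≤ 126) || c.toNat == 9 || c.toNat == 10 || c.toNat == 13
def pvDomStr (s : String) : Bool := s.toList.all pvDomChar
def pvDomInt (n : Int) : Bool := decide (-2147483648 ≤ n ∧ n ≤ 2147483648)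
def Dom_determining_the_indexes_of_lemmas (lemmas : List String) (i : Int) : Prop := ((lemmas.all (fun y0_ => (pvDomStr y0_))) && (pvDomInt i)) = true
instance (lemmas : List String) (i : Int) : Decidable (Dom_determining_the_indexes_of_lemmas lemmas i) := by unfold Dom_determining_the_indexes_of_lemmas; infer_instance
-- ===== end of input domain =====

-- B replaces A's per-element membership-test-and-append loop by a count pass plus a
-- materialization pass ([i] * count per distinct lemma); objective: simpler decomposition.

-- ===== PORT A =====
-- for lemm in lemmas: if lemm not in indexes: indexes[lemm]=[]; indexes[lemm].append(i) else: indexes[lemm].append(i)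
def determining_the_indexes_of_lemmas (lemmas : List String) (i : Int) : List (String × List Int) :=
  (lemmas.foldl (fun indexes lemm =>
    if !(indexes.contains lemm) then
      ((indexes.insert lemm []).modify lemm [] (fun l => l ++ [i]))
    else
      indexes.modify lemm [] (fun l => l ++ [i])) PySem.Dict.empty).items

-- ===== PORT B =====
-- counts[lemm] = counts.get(lemm, 0) + 1; then {lemm: [i]*count for lemm, count in counts.items()}
def determining_the_indexes_of_lemmas_alt (lemmas : List String) (i : Int) : List (String × List Int) :=
  let counts : PySem.Dict String Int :=
    lemmas.foldl (fun d lemm => d.insert lemm (d.getD lemm 0 + 1)) PySem.Dict.empty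
  counts.items.map (fun p => (p.1, List.replicate p.2.toNat i))

-- ===== PRECONDITION & SPEC =====
def Spec_determining_the_indexes_of_lemmas (lemmas : List String) (i : Int) (out : List (String × List Int)) : Prop := out = determining_the_indexes_of_lemmas_alt lemmas i
instance (lemmas : List String) (i : Int) (out : List (String × List Int)) : Decidable (Spec_determining_the_indexes_of_lemmas lemmas i out) := by unfold Spec_determining_the_indexes_of_lemmas; infer_instance

-- ===== CLAIM (what is proved, stated in full; the proofs are below) =====
def Claim_equal_determining_the_indexes_of_lemmas : Prop := ∀ (lemmas : List String) (i : Int), Dom_determining_the_indexes_of_lemmas lemmas i → Spec_determining_the_indexes_of_lemmas lemmas i (determining_the_indexes_of_lemmas lemmas i)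

-- ===== LEMMAS AND PROOFS =====

-- ===== VERDICT (by name: the statement is the Claim_ definition above) =====
-- A's branch is the same dict operation in both arms
theorem stepA_eq (i : Int) (d : PySem.Dict String (List Int)) (l : String) :
    (if !(d.contains l) then ((d.insert l []).modify l [] (fun xs => xs ++ [i]))
     else d.modify l [] (fun xs => xs ++ [i])) = d.modify l [] (fun xs => xs ++ [i]) := by
  split_ifs with h
  · show (d.insert l []).insert l ((d.insert l []).getD l [] ++ [i]) = d.insert l (d.getD l [] ++ [i])
    rw [PySem.Dict.insert_insert_self, PySem.Dict.getD_insert_self]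
    simp only [Bool.not_eq_eq_eq_not] at h
    simp [PySem.Dict.getD_of_not_contains, h]
  · rfl

theorem dictA_eq (lemmas : List String) (i : Int) :
    lemmas.foldl (fun indexes lemm =>
      if !(indexes.contains lemm) then ((indexes.insert lemm []).modify lemm [] (fun l => l ++ [i]))
      else indexes.modify lemm [] (fun l => l ++ [i])) PySem.Dict.empty
    = lemmas.foldl (fun d lemm => d.modify lemm [] (fun l => l ++ [i])) PySem.Dict.empty := by
  congr 1
  funext d l
  exact stepA_eq i d l

theorem determining_the_indexes_of_lemmas_spec : Claim_equal_determining_the_indexes_of_lemmas := by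
  intro lemmas i _
  show _ = _
  unfold determining_the_indexes_of_lemmas determining_the_indexes_of_lemmas_alt
  rw [dictA_eq]
  rw [PySem.Dict.foldl_insert_getD_add_one_eq_counter]
  set d := lemmas.foldl (fun d lemm => d.modify lemm [] (fun l => l ++ [i])) PySem.Dict.empty with hd
  have hkeys : d.keys = PySem.Set.ofList lemmas := by
    rw [hd, PySem.Dict.keys_foldl_modify]
    simp [PySem.Dict.keys_empty, PySem.Set.update_nil_left]
  have hnd : d.keys.Nodup := by rw [hkeys]; exact PySem.Set.nodup_ofList lemmas
  have hgetD : ∀ k, d.getD k [] = List.replicate (lemmas.count k) i := by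
    intro k
    have : d = (lemmas.map (fun l => (l, i))).foldl
        (fun d p => d.modify p.1 [] (fun l => l ++ [p.2])) PySem.Dict.empty := by
      rw [hd, List.foldl_map]
    rw [this, PySem.Dict.getD_foldl_modify_append]
    simp [List.filter_map, Function.comp_def, List.count_eq_countP, List.countP_eq_length_filter]
  rw [PySem.Dict.items_eq_map_keys d hnd [], hkeys]
  show _ = List.map (fun p => (p.1, List.replicate p.2.toNat i)) (PySem.Dict.counter lemmas).items
  rw [PySem.Dict.items_counter, List.map_map]
  refine List.map_congr_left (fun k _ => ?_)
  simp [hgetD k]
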